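-- pv_equiv track=rewrite | github.com/Mohit4022-cloud/EmailDJ | scripts/check_render_blueprint.py | _top_level_item_blocks
-- ===== SOURCE A (Python) =====
-- def _top_level_item_blocks(section: str) -> list[str]:
--     blocks: list[list[str]] = []
--     current: list[str] = []
--     for line in section.splitlines():
--         if line.startswith("  - "):
--             if current:
--                 blocks.append(current)
--             current = [line]
--         elif current:
--             current.append(line)
--     if current:
--         blocks.append(current)
--     return ["\n".join(block) for block in blocks]
-- ===== SOURCE B (Python) =====
-- def _top_level_item_blocks(section: str) -> list[str]:
--     blocks: list[str] = []
--     current: list[str] = []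
--     for line in reversed(section.splitlines()):
--         current.append(line)
--         if line.startswith("  - "):
--             blocks.append("\n".join(reversed(current)))
--             current = []
--     blocks.reverse()
--     return blocks
-- ===== Notes on version B (the rewrite author's own statement) =====
-- stated objective: alternative
-- what changed: Replaces A's forward scan that carries a current block and flushes it at each marker and at the end with a reverse scan that builds blocks back-to-front, emitting a completed block exactly when it reaches its marker line (no end-of-loop flush, no emptiness checks; leading non-marker lines are dropped naturally).
import Mathlib
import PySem

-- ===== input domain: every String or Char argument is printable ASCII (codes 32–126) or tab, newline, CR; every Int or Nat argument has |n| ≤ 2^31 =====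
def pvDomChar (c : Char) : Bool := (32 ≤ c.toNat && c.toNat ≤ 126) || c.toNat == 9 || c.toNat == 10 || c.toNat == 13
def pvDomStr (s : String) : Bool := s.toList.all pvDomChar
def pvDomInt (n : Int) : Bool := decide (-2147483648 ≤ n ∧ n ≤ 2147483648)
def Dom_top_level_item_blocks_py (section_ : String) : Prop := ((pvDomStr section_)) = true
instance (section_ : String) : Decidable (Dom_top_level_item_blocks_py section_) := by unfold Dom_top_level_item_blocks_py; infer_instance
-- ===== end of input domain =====

-- B replaces A's forward carry-and-flush scan by a reverse scan that emits each block
-- when it meets its marker line (alternative decomposition; no final flush, leading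
-- non-marker lines are dropped naturally).


-- ===== PORT A =====
-- the marker test line.startswith("  - "), shared by both ports
def pvMarker (line : String) : Bool := PySem.Str.startswith line "  - "

-- one step of A's loop body: state = (blocks, current)
def pvStepA (st : List (List String) × List String) (line : String) :
    List (List String) × List String :=
  if pvMarker line then
    ((if st.2.isEmpty then st.1 else st.1 ++ [st.2]), [line])
  else if st.2.isEmpty then st
  else (st.1, st.2 ++ [line])

def top_level_item_blocks_py (section_ : String) : List String :=
  let st := (PySem.Str.splitlines section_).foldl pvStepA ([], [])
  let blocks := if st.2.isEmpty then st.1 else st.1 ++ [st.2]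
  blocks.map (fun block => PySem.Str.join "\n" block)

-- ===== PORT B =====
-- one step of B's reversed loop body: state = (blocks-in-reverse-order, current-reversed)
def pvStepB (st : List String × List String) (line : String) :
    List String × List String :=
  let cur := st.2 ++ [line]
  if pvMarker line then
    (st.1 ++ [PySem.Str.join "\n" cur.reverse], [])
  else (st.1, cur)

def top_level_item_blocks_py_alt (section_ : String) : List String :=
  let st := (PySem.Str.splitlines section_).reverse.foldl pvStepB ([], [])
  st.1.reverse

-- ===== PRECONDITION & SPEC =====
def Spec_top_level_item_blocks_py (section_ : String) (out : List String) : Prop := out = top_level_item_blocks_py_alt section_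
instance (section_ : String) (out : List String) : Decidable (Spec_top_level_item_blocks_py section_ out) := by unfold Spec_top_level_item_blocks_py; infer_instance

-- ===== CLAIM (what is proved, stated in full; the proofs are below) =====
def Claim_equal_top_level_item_blocks_py : Prop := ∀ (section_ : String), Dom_top_level_item_blocks_py section_ → Spec_top_level_item_blocks_py section_ (top_level_item_blocks_py section_)

-- ===== LEMMAS AND PROOFS =====

-- reference decomposition: split a line list at marker lines (callers pass a list
-- whose head, if any, is a marker line)
def pvBlocks : List String → List (List String)
  | [] => []
  | l :: ls =>
      (l :: ls.takeWhile (fun x => !pvMarker x)) ::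
        pvBlocks (ls.dropWhile (fun x => !pvMarker x))
termination_by ls => ls.length
decreasing_by
  exact Nat.lt_succ_of_le ((List.dropWhile_sublist _).length_le)

theorem pvBlocks_nil : pvBlocks [] = [] := by rw [pvBlocks.eq_def]

theorem pvBlocks_cons (l : String) (ls : List String) :
    pvBlocks (l :: ls) =
      (l :: ls.takeWhile (fun x => !pvMarker x)) ::
        pvBlocks (ls.dropWhile (fun x => !pvMarker x)) := by rw [pvBlocks.eq_def]

-- A's loop finalization (the trailing 'if current: blocks.append(current)')
def pvFinA (st : List (List String) × List String) : List (List String) :=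
  if st.2.isEmpty then st.1 else st.1 ++ [st.2]

-- A's fold with a nonempty current, finalized, splits the remaining lines at markers
theorem pvA_active (lines : List String) :
    ∀ (bs : List (List String)) (cur : List String), cur ≠ [] →
    pvFinA (lines.foldl pvStepA (bs, cur)) =
      bs ++ (cur ++ lines.takeWhile (fun x => !pvMarker x)) ::
        pvBlocks (lines.dropWhile (fun x => !pvMarker x)) := by
  induction lines with
  | nil =>
      intro bs cur hcur
      simp [pvFinA, pvBlocks_nil, List.isEmpty_iff, hcur]
  | cons l ls ih =>
      intro bs cur hcur
      rw [List.foldl_cons]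
      cases hm : pvMarker l with
      | false =>
          have hstep : pvStepA (bs, cur) l = (bs, cur ++ [l]) := by
            simp [pvStepA, hm, List.isEmpty_iff, hcur]
          rw [hstep, ih bs (cur ++ [l]) (by simp)]
          simp [hm]
      | true =>
          have hstep : pvStepA (bs, cur) l = (bs ++ [cur], [l]) := by
            simp [pvStepA, hm, List.isEmpty_iff, hcur]
          rw [hstep, ih (bs ++ [cur]) [l] (by simp)]
          simp [hm, pvBlocks_cons]

-- A's fold from an empty current skips lines up to the first marker
theorem pvA_skip (lines : List String) :
    ∀ (bs : List (List String)),
    pvFinA (lines.foldl pvStepA (bs, [])) =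
      bs ++ pvBlocks (lines.dropWhile (fun x => !pvMarker x)) := by
  induction lines with
  | nil => intro bs; simp [pvFinA, pvBlocks_nil]
  | cons l ls ih =>
      intro bs
      rw [List.foldl_cons]
      cases hm : pvMarker l with
      | false =>
          have hstep : pvStepA (bs, []) l = (bs, []) := by simp [pvStepA, hm]
          rw [hstep, ih bs]
          simp [hm]
      | true =>
          have hstep : pvStepA (bs, []) l = (bs, [l]) := by simp [pvStepA, hm]
          rw [hstep, pvA_active ls bs [l] (by simp)]
          simp [hm, pvBlocks_cons]

-- B's reverse fold (as a foldr) carries the joined blocks in reverse order and the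
-- pending leading lines reversed
theorem pvB_foldr (lines : List String) :
    lines.foldr (fun line st => pvStepB st line) ([], []) =
      (((pvBlocks (lines.dropWhile (fun x => !pvMarker x))).map
          (fun b => PySem.Str.join "\n" b)).reverse,
        (lines.takeWhile (fun x => !pvMarker x)).reverse) := by
  induction lines with
  | nil => simp [pvBlocks_nil]
  | cons l ls ih =>
      rw [List.foldr_cons, ih]
      cases hm : pvMarker l with
      | false => simp [pvStepB, hm]
      | true => simp [pvStepB, hm, pvBlocks_cons]

-- ===== VERDICT (by name: the statement is the Claim_ definition above) =====
theorem top_level_item_blocks_py_spec : Claim_equal_top_level_item_blocks_py := by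
  intro section_ _
  unfold Spec_top_level_item_blocks_py
  show List.map (fun block => PySem.Str.join "\n" block)
        (pvFinA ((PySem.Str.splitlines section_).foldl pvStepA ([], []))) =
      ((PySem.Str.splitlines section_).reverse.foldl pvStepB ([], [])).1.reverse
  rw [pvA_skip, List.foldl_reverse, pvB_foldr]
  simp
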